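-- pv_equiv track=rewrite | github.com/Liri3d/PortraitSemObj | regex.py | remove_extra_parentheses
-- ===== SOURCE A (Python) =====
-- def remove_extra_parentheses(expression):
--     stack = []
--     result = []
--     skip_indices = set()  # Для хранения индексов, которые нужно пропустить
--
--     for i, char in enumerate(expression):
--         if char == '(':
--             stack.append(len(result))  # Сохраняем текущую позицию в результат
--             result.append(char)
--         elif char == ')':
--             if stack:
--                 start_index = stack.pop()  # Получаем позицию открывающей скобки
--                 # Проверяем содержимое между скобками
--                 content = ''.join(result[start_index + 1:])  # Содержимое между скобками
--                 if '|' in content:  # Если есть '|' в содержимом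
--                     result.append(char)  # Оставляем скобки
--                 else:
--                     skip_indices.add(start_index)  # Запоминаем, что нужно пропустить
--                     result.append('')  # Вместо закрывающей скобки добавляем пустую строку
--             else:
--                 result.append(char)  # Закрывающая скобка без соответствующей открывающей
--         else:
--             result.append(char)  # Добавляем другие символы
--
--     # Удаляем элементы по индексам, которые были отмечены для пропуска
--     final_result = []
--     for i in range(len(result)):
--         if i not in skip_indices:
--             if result[i]:  # Добавляем только непустые элементы
--                 final_result.append(result[i])
--
--     return ''.join(final_result)
-- ===== SOURCE B (Python) =====
-- def remove_extra_parentheses(expression):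
--     # One pass: push (index, running '|' count) at '('; at the matching ')'
--     # the pair encloses a '|' iff the running count changed; otherwise both
--     # parentheses are marked for removal.
--     bars = 0
--     stack = []
--     removed = set()
--     for i, ch in enumerate(expression):
--         if ch == '(':
--             stack.append((i, bars))
--         elif ch == ')':
--             if stack:
--                 j, b0 = stack.pop()
--                 if bars == b0:
--                     removed.add(j)
--                     removed.add(i)
--         elif ch == '|':
--             bars += 1
--     return ''.join(ch for i, ch in enumerate(expression) if i not in removed)
-- ===== Notes on version B (the rewrite author's own statement) =====
-- stated objective: alternative
-- what changed: Instead of rebuilding and re-joining the partial result on every ')' to test for '|', B keeps a running count of '|' characters, pushes the count with each '(' and compares it at the matching ')', marking both indices for removal; the output is one filtered pass over the input.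
import Mathlib
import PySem

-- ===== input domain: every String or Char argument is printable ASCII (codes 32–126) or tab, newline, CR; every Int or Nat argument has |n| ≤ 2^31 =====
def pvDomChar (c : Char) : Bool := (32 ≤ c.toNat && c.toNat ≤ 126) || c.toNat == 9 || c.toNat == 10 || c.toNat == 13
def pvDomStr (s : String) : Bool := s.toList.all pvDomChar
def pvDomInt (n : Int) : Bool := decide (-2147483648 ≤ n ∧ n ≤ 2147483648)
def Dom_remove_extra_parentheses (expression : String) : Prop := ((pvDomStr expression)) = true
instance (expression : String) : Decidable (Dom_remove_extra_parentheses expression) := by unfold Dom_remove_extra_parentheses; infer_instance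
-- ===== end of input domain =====

-- B replaces A's re-join-and-scan test on every ')' by a running '|' counter pushed with
-- each '(' (objective: alternative single-pass algorithm).

-- ===== PORT A =====
-- A's main loop; the Python stack/list appends and pops at the END, which is ported as
-- cons/pattern-match at the HEAD (the stack is kept reversed); `result` is appended at the
-- end exactly as in Python.  `''.join(result[start+1:])` is PySem.Str.join "" of List.drop,
-- `'|' in content` is PySem.Str.isIn.
def pvA_loop : List Char → List Nat → List String → PySem.Set Nat →
    List Nat × List String × PySem.Set Nat
  | [], stack, result, skip => (stack, result, skip)
  | c :: rest, stack, result, skip =>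
    if c = '(' then
      pvA_loop rest (result.length :: stack) (result ++ [String.singleton c]) skip
    else if c = ')' then
      match stack with
      | start_index :: stack' =>
        if PySem.Str.isIn "|" (PySem.Str.join "" (result.drop (start_index + 1))) then
          pvA_loop rest stack' (result ++ [String.singleton c]) skip
        else
          pvA_loop rest stack' (result ++ [""]) (PySem.Set.add skip start_index)
      | [] => pvA_loop rest [] (result ++ [String.singleton c]) skip
    else
      pvA_loop rest stack (result ++ [String.singleton c]) skip

def remove_extra_parentheses (expression : String) : String :=
  let r := pvA_loop expression.toList [] [] PySem.Set.empty
  let result := r.2.1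
  let skip_indices := r.2.2
  -- final loop: for i in range(len(result)): if i not in skip: if result[i]: append
  -- result[i] is always in range here, so List.getD is exact.
  PySem.Str.join ""
    ((List.range result.length).foldl
      (fun acc i =>
        if PySem.Set.contains skip_indices i then acc
        else if result.getD i "" ≠ "" then acc ++ [result.getD i ""] else acc)
      [])

-- ===== PORT B =====
-- B's loop; `enumerate` is ported by hand with an explicit Nat index (exact: the index
-- counts from 0 and is never negative); the Python stack pops at the end, ported as
-- cons/match at the head.
def pvB_loop : List Char → Nat → Nat → List (Nat × Nat) → PySem.Set Nat →
    Nat × List (Nat × Nat) × PySem.Set Nat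
  | [], _, bars, stack, removed => (bars, stack, removed)
  | c :: rest, i, bars, stack, removed =>
    if c = '(' then
      pvB_loop rest (i + 1) bars ((i, bars) :: stack) removed
    else if c = ')' then
      match stack with
      | (j, b0) :: stack' =>
        if bars = b0 then
          pvB_loop rest (i + 1) bars stack' (PySem.Set.add (PySem.Set.add removed j) i)
        else
          pvB_loop rest (i + 1) bars stack' removed
      | [] => pvB_loop rest (i + 1) bars stack removed
    else if c = '|' then
      pvB_loop rest (i + 1) (bars + 1) stack removed
    else
      pvB_loop rest (i + 1) bars stack removed

-- the final generator ''.join(ch for i, ch in enumerate(expression) if i not in removed)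
def pvB_filter : List Char → Nat → PySem.Set Nat → List Char
  | [], _, _ => []
  | c :: rest, i, removed =>
    if PySem.Set.contains removed i then pvB_filter rest (i + 1) removed
    else c :: pvB_filter rest (i + 1) removed

def remove_extra_parentheses_alt (expression : String) : String :=
  let r := pvB_loop expression.toList 0 0 [] PySem.Set.empty
  String.ofList (pvB_filter expression.toList 0 r.2.2)

-- ===== PRECONDITION & SPEC =====
def Spec_remove_extra_parentheses (expression : String) (out : String) : Prop := out = remove_extra_parentheses_alt expression
instance (expression : String) (out : String) : Decidable (Spec_remove_extra_parentheses expression out) := by unfold Spec_remove_extra_parentheses; infer_instance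

-- ===== CLAIM (what is proved, stated in full; the proofs are below) =====
def Claim_equal_remove_extra_parentheses : Prop := ∀ (expression : String), Dom_remove_extra_parentheses expression → Spec_remove_extra_parentheses expression (remove_extra_parentheses expression)

-- ===== LEMMAS AND PROOFS =====

-- The coupling invariant between A's state (stack, result, skip) and B's state
-- (bars, stackB, removed) after both loops have consumed the prefix `pre`.
def pvInv (pre : List Char) (stackA : List Nat) (result : List String) (skip : PySem.Set Nat)
    (bars : Nat) (stackB : List (Nat × Nat)) (removed : PySem.Set Nat) : Prop :=
  result.length = pre.length ∧
  bars = pre.count '|' ∧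
  stackA = stackB.map Prod.fst ∧
  (∀ p ∈ stackB, p.1 < pre.length ∧ pre.getD p.1 ' ' = '(' ∧ p.2 = (pre.take p.1).count '|') ∧
  (∀ k, k < pre.length →
    result.getD k "" = String.singleton (pre.getD k ' ') ∨
      (result.getD k "" = "" ∧ pre.getD k ' ' = ')')) ∧
  (∀ k, skip.contains k = true → k < pre.length) ∧
  (∀ k, removed.contains k = true → k < pre.length) ∧
  (∀ k, k < pre.length →
    (removed.contains k = true ↔ (skip.contains k = true ∨ result.getD k "" = "")))

theorem pvSet_contains_add {s : PySem.Set Nat} {x y : Nat} :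
    (PySem.Set.add s x).contains y = true ↔ (s.contains y = true ∨ y = x) := by
  rw [PySem.Set.contains_iff, PySem.Set.contains_iff, PySem.Set.mem_add]

theorem pvChars_join_nil_flatten (l : List (List Char)) :
    PySem.Chars.join [] l = l.flatten := by
  induction l with
  | nil => simp [PySem.Chars.join_nil]
  | cons x xs ih =>
    cases xs with
    | nil => simp [PySem.Chars.join_singleton]
    | cons y ys => rw [PySem.Chars.join_cons_cons] at *; simp at *; simp [ih]

theorem pvJoin_has_bar (L : List String) :
    PySem.Str.isIn "|" (PySem.Str.join "" L) = true ↔ ∃ s ∈ L, '|' ∈ s.toList := by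
  rw [PySem.Str.isIn_iff_infix, PySem.Str.toList_join]
  have h0 : ("" : String).toList = [] := rfl
  rw [h0, pvChars_join_nil_flatten]
  have h1 : ("|" : String).toList = ['|'] := rfl
  rw [h1]
  constructor
  · rintro ⟨p, q, h⟩
    have : '|' ∈ (List.map String.toList L).flatten := by
      rw [← h]; simp
    rw [List.mem_flatten] at this
    obtain ⟨l, hl, hm⟩ := this
    simp at hl
    obtain ⟨s, hs, rfl⟩ := hl
    exact ⟨s, hs, hm⟩
  · rintro ⟨s, hs, hm⟩
    have : '|' ∈ (List.map String.toList L).flatten := by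
      rw [List.mem_flatten]; exact ⟨s.toList, List.mem_map_of_mem hs, hm⟩
    obtain ⟨p, q, h⟩ := List.append_of_mem this
    exact ⟨p, q, by rw [h]; simp⟩

theorem pvTest_equiv (pre : List Char) (result : List String) (j : Nat)
    (hlen : result.length = pre.length)
    (hres : ∀ k, k < pre.length →
      result.getD k "" = String.singleton (pre.getD k ' ') ∨
        (result.getD k "" = "" ∧ pre.getD k ' ' = ')')) :
    (PySem.Str.isIn "|" (PySem.Str.join "" (result.drop (j + 1))) = true ↔
      ((pre.drop (j + 1)).count '|' ≠ 0)) := by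
  rw [pvJoin_has_bar]
  rw [Ne, List.count_eq_zero, not_not]  -- count ≠ 0 ↔ '|' ∈ drop
  constructor
  · rintro ⟨s, hs, hm⟩
    obtain ⟨i, hi, hg⟩ := List.getElem_of_mem hs
    rw [List.getElem_drop] at hg
    have hlt : j + 1 + i < pre.length := by
      have := hi; rw [List.length_drop] at this; omega
    have hk := hres (j + 1 + i) hlt
    have hgd : result.getD (j + 1 + i) "" = s := by
      rw [List.getD_eq_getElem _ _ (by omega), hg]
    rcases hk with h | ⟨h, _⟩
    · rw [hgd] at h
      subst h
      rw [String.toList_singleton] at hm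
      simp at hm
      have : (pre.drop (j + 1))[i]'(by rw [List.length_drop]; omega) = '|' := by
        rw [List.getElem_drop]
        rw [List.getElem?_eq_getElem hlt] at hm
        simp at hm
        exact hm.symm
      exact this ▸ List.getElem_mem _
    · rw [hgd] at h; subst h; simp at hm
  · intro hm
    obtain ⟨i, hi, hg⟩ := List.getElem_of_mem hm
    rw [List.getElem_drop] at hg
    have hlt : j + 1 + i < pre.length := by
      rw [List.length_drop] at hi; omega
    have hk := hres (j + 1 + i) hlt
    have hpd : pre.getD (j + 1 + i) ' ' = '|' := by
      rw [List.getD_eq_getElem _ _ hlt, hg]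
    rcases hk with h | ⟨_, h⟩
    · refine ⟨result.getD (j + 1 + i) "", ?_, ?_⟩
      · have hri : j + 1 + i < result.length := by omega
        have : result.getD (j + 1 + i) "" = (result.drop (j + 1))[i]'(by rw [List.length_drop]; omega) := by
          rw [List.getElem_drop, List.getD_eq_getElem _ _ hri]
        rw [this]; exact List.getElem_mem _
      · rw [h, hpd, String.toList_singleton]; simp
    · rw [hpd] at h; exact absurd h (by decide)

-- clause-5 preservation when a real character is appended to `result`
theorem pvC5_single (pre : List Char) (res : List String) (c : Char)
    (h1 : res.length = pre.length)
    (h5 : ∀ k, k < pre.length →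
      res.getD k "" = String.singleton (pre.getD k ' ') ∨
        (res.getD k "" = "" ∧ pre.getD k ' ' = ')')) :
    ∀ k, k < (pre ++ [c]).length →
      (res ++ [String.singleton c]).getD k "" = String.singleton ((pre ++ [c]).getD k ' ') ∨
        ((res ++ [String.singleton c]).getD k "" = "" ∧ (pre ++ [c]).getD k ' ' = ')') := by
  intro k hk
  rw [List.length_append, List.length_singleton] at hk
  by_cases hlt : k < pre.length
  · rw [List.getD_append _ _ _ _ (by omega), List.getD_append _ _ _ _ hlt]
    exact h5 k hlt
  · have hke : k = pre.length := by omega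
    subst hke
    left
    rw [← h1]
    have e1 : (res ++ [String.singleton c]).getD res.length "" = String.singleton c := by
      simp [List.getD]
    have e2 : (pre ++ [c]).getD pre.length ' ' = c := by
      simp [List.getD]
    rw [e1, h1, e2]

-- clause-5 preservation when a dropped ')' is recorded as an empty entry
theorem pvC5_empty (pre : List Char) (res : List String)
    (h1 : res.length = pre.length)
    (h5 : ∀ k, k < pre.length →
      res.getD k "" = String.singleton (pre.getD k ' ') ∨
        (res.getD k "" = "" ∧ pre.getD k ' ' = ')')) :
    ∀ k, k < (pre ++ [')']).length →
      (res ++ [""]).getD k "" = String.singleton ((pre ++ [')']).getD k ' ') ∨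
        ((res ++ [""]).getD k "" = "" ∧ (pre ++ [')']).getD k ' ' = ')') := by
  intro k hk
  rw [List.length_append, List.length_singleton] at hk
  by_cases hlt : k < pre.length
  · rw [List.getD_append _ _ _ _ (by omega), List.getD_append _ _ _ _ hlt]
    exact h5 k hlt
  · have hke : k = pre.length := by omega
    subst hke
    right
    constructor
    · rw [← h1]; simp [List.getD]
    · simp [List.getD]

-- clause-4 preservation for the untouched part of B's stack
theorem pvC4_app (pre : List Char) (c : Char) (sB : List (Nat × Nat))
    (h4 : ∀ p ∈ sB, p.1 < pre.length ∧ pre.getD p.1 ' ' = '(' ∧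
      p.2 = (pre.take p.1).count '|') :
    ∀ p ∈ sB, p.1 < (pre ++ [c]).length ∧ (pre ++ [c]).getD p.1 ' ' = '(' ∧
      p.2 = ((pre ++ [c]).take p.1).count '|' := by
  intro p hp
  obtain ⟨ha, hb, hc⟩ := h4 p hp
  refine ⟨by simp; omega, ?_, ?_⟩
  · rw [List.getD_append _ _ _ _ ha]; exact hb
  · rw [List.take_append_of_le_length (by omega)]; exact hc

-- clause-8 preservation when the appended entry is kept and no set changes
theorem pvC8_keep (pre : List Char) (res : List String) (sk rm : PySem.Set Nat) (s : String)
    (h1 : res.length = pre.length) (hs : s ≠ "")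
    (h6 : ∀ k, sk.contains k = true → k < pre.length)
    (h7 : ∀ k, rm.contains k = true → k < pre.length)
    (h8 : ∀ k, k < pre.length →
      (rm.contains k = true ↔ (sk.contains k = true ∨ res.getD k "" = ""))) :
    ∀ k, k < pre.length + 1 →
      (rm.contains k = true ↔ (sk.contains k = true ∨ (res ++ [s]).getD k "" = "")) := by
  intro k hk
  by_cases hlt : k < pre.length
  · rw [List.getD_append _ _ _ _ (by omega)]
    exact h8 k hlt
  · have hke : k = pre.length := by omega
    subst hke
    have e : (res ++ [s]).getD pre.length "" = s := by
      rw [← h1]; simp [List.getD]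
    rw [e]
    constructor
    · intro hx; exact absurd (h7 _ hx) (by omega)
    · rintro (hx | hx)
      · exact absurd (h6 _ hx) (by omega)
      · exact absurd hx hs

-- the single induction step over the remaining characters
theorem pvLoop_inv (rest : List Char) :
    ∀ (pre : List Char) stackA result skip bars stackB removed,
    pvInv pre stackA result skip bars stackB removed →
    ∃ stackA' result' skip' bars' stackB' removed',
      pvA_loop rest stackA result skip = (stackA', result', skip') ∧
      pvB_loop rest pre.length bars stackB removed = (bars', stackB', removed') ∧
      pvInv (pre ++ rest) stackA' result' skip' bars' stackB' removed' := by
  induction rest with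
  | nil =>
    intro pre sA res sk bars sB rm h
    exact ⟨sA, res, sk, bars, sB, rm, rfl, rfl, by simpa using h⟩
  | cons c rest ih =>
    intro pre sA res sk bars sB rm h
    obtain ⟨h1, h2, h3, h4, h5, h6, h7, h8⟩ := h
    have hlen1 : (pre ++ [c]).length = pre.length + 1 := by simp
    by_cases hc1 : c = '('
    · subst hc1
      have hinv : pvInv (pre ++ ['(']) (res.length :: sA) (res ++ [String.singleton '(']) sk
          bars ((pre.length, bars) :: sB) rm := by
        refine ⟨by simp [h1], ?_, by simp [h3, h1], ?_, pvC5_single pre res '(' h1 h5,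
          fun k hk => by rw [hlen1]; exact Nat.lt_succ_of_lt (h6 k hk),
          fun k hk => by rw [hlen1]; exact Nat.lt_succ_of_lt (h7 k hk), ?_⟩
        · rw [List.count_append, h2]; rfl
        · intro p hp
          rcases List.mem_cons.mp hp with hp | hp
          · subst hp
            refine ⟨by simp, by simp [List.getD], ?_⟩
            rw [List.take_append_of_le_length (by omega), List.take_length]
            exact h2
          · exact pvC4_app pre '(' sB h4 p hp
        · rw [hlen1]
          exact pvC8_keep pre res sk rm _ h1 (by decide) h6 h7 h8
      obtain ⟨A', r', s', b', SB', R', eA, eB, inv⟩ := ih (pre ++ ['(']) _ _ _ _ _ _ hinv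
      refine ⟨A', r', s', b', SB', R', ?_, ?_, ?_⟩
      · rw [pvA_loop.eq_def]; simp only [reduceIte]; exact eA
      · rw [pvB_loop.eq_def]; simp only [reduceIte]
        rw [show pre.length + 1 = (pre ++ ['(']).length from (hlen1).symm]
        exact eB
      · rw [List.append_cons]; exact inv
    · by_cases hc2 : c = ')'
      · subst hc2
        cases sB with
        | nil =>
          have hsA : sA = [] := by rw [h3]; rfl
          subst hsA
          have hinv : pvInv (pre ++ [')']) [] (res ++ [String.singleton ')']) sk
              bars [] rm := by
            refine ⟨by simp [h1], ?_, rfl, fun p hp => absurd hp (List.not_mem_nil),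
              pvC5_single pre res ')' h1 h5,
              fun k hk => by rw [hlen1]; exact Nat.lt_succ_of_lt (h6 k hk),
              fun k hk => by rw [hlen1]; exact Nat.lt_succ_of_lt (h7 k hk), ?_⟩
            · rw [List.count_append, h2]; rfl
            · rw [hlen1]
              exact pvC8_keep pre res sk rm _ h1 (by decide) h6 h7 h8
          obtain ⟨A', r', s', b', SB', R', eA, eB, inv⟩ := ih (pre ++ [')']) _ _ _ _ _ _ hinv
          refine ⟨A', r', s', b', SB', R', ?_, ?_, ?_⟩
          · rw [pvA_loop.eq_def]
            simp only [if_neg (show ¬(')' = '(') by decide), reduceIte]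
            exact eA
          · rw [pvB_loop.eq_def]
            simp only [if_neg (show ¬(')' = '(') by decide), reduceIte]
            rw [show pre.length + 1 = (pre ++ [')']).length from (hlen1).symm]
            exact eB
          · rw [List.append_cons]; exact inv
        | cons hd sB' =>
          obtain ⟨j, b0⟩ := hd
          have hsA : sA = j :: sB'.map Prod.fst := by rw [h3]; rfl
          subst hsA
          obtain ⟨hjlen, hjch, hjb⟩ := h4 (j, b0) List.mem_cons_self
          have hjlen : j < pre.length := hjlen
          have hjch : pre.getD j ' ' = '(' := hjch
          have hjb : b0 = (pre.take j).count '|' := hjb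
          have hj? : pre[j]? = some '(' := by
            rw [List.getElem?_eq_getElem hjlen]
            rw [List.getD_eq_getElem _ _ hjlen] at hjch
            rw [hjch]
          have hsplit : pre.count '|' = (pre.take j).count '|' + (pre.drop (j + 1)).count '|' := by
            conv_lhs => rw [← List.take_append_drop (j + 1) pre]
            rw [List.count_append]
            congr 1
            rw [List.take_add_one, hj?, List.count_append]
            rfl
          have htest := pvTest_equiv pre res j h1 h5
          by_cases hbb : bars = b0
          · -- no '|' between the pair: A drops it, B marks both indices
            have hcnt : (pre.drop (j + 1)).count '|' = 0 := by
              rw [h2, hsplit] at hbb; rw [hjb] at hbb; omega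
            have hT : PySem.Str.isIn "|" (PySem.Str.join "" (res.drop (j + 1))) = false := by
              rw [Bool.eq_false_iff]
              intro hx
              exact (htest.mp hx) hcnt
            have hinv : pvInv (pre ++ [')']) (sB'.map Prod.fst) (res ++ [""])
                (PySem.Set.add sk j) bars sB'
                (PySem.Set.add (PySem.Set.add rm j) pre.length) := by
              refine ⟨by simp [h1], ?_, rfl, ?_, pvC5_empty pre res h1 h5, ?_, ?_, ?_⟩
              · rw [List.count_append, h2]; rfl
              · exact pvC4_app pre ')' sB' (fun p hp => h4 p (List.mem_cons_of_mem _ hp))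
              · intro k hk
                rcases pvSet_contains_add.mp hk with hk | hk
                · rw [hlen1]; exact Nat.lt_succ_of_lt (h6 k hk)
                · rw [hlen1]; omega
              · intro k hk
                rcases pvSet_contains_add.mp hk with hk | hk
                · rcases pvSet_contains_add.mp hk with hk | hk
                  · rw [hlen1]; exact Nat.lt_succ_of_lt (h7 k hk)
                  · rw [hlen1]; omega
                · rw [hlen1]; omega
              · intro k hk
                rw [hlen1] at hk
                rw [pvSet_contains_add, pvSet_contains_add, pvSet_contains_add]
                by_cases hkn : k = pre.length
                · subst hkn
                  have e : (res ++ [""]).getD pre.length "" = "" := by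
                    rw [← h1]; simp [List.getD]
                  rw [e]
                  simp
                · have hklt : k < pre.length := by omega
                  rw [List.getD_append _ _ _ _ (by omega)]
                  constructor
                  · rintro ((hx | hx) | hx)
                    · rcases (h8 k hklt).mp hx with hy | hy
                      · exact Or.inl (Or.inl hy)
                      · exact Or.inr hy
                    · exact Or.inl (Or.inr hx)
                    · exact absurd hx hkn
                  · rintro ((hx | hx) | hx)
                    · exact Or.inl (Or.inl ((h8 k hklt).mpr (Or.inl hx)))
                    · exact Or.inl (Or.inr hx)
                    · exact Or.inl (Or.inl ((h8 k hklt).mpr (Or.inr hx)))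
            obtain ⟨A', r', s', b', SB', R', eA, eB, inv⟩ := ih (pre ++ [')']) _ _ _ _ _ _ hinv
            refine ⟨A', r', s', b', SB', R', ?_, ?_, ?_⟩
            · rw [pvA_loop.eq_def]
              simp only [if_neg (show ¬(')' = '(') by decide), reduceIte, hT,
                Bool.false_eq_true]
              exact eA
            · rw [pvB_loop.eq_def]
              simp only [if_neg (show ¬(')' = '(') by decide), reduceIte, if_pos hbb]
              rw [show pre.length + 1 = (pre ++ [')']).length from (hlen1).symm]
              exact eB
            · rw [List.append_cons]; exact inv
          · -- a '|' lies between the pair: both keep the parentheses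
            have hcnt : (pre.drop (j + 1)).count '|' ≠ 0 := by
              rw [h2, hsplit, hjb] at hbb; omega
            have hT : PySem.Str.isIn "|" (PySem.Str.join "" (res.drop (j + 1))) = true :=
              htest.mpr hcnt
            have hinv : pvInv (pre ++ [')']) (sB'.map Prod.fst)
                (res ++ [String.singleton ')']) sk bars sB' rm := by
              refine ⟨by simp [h1], ?_, rfl, ?_, pvC5_single pre res ')' h1 h5,
                fun k hk => by rw [hlen1]; exact Nat.lt_succ_of_lt (h6 k hk),
                fun k hk => by rw [hlen1]; exact Nat.lt_succ_of_lt (h7 k hk), ?_⟩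
              · rw [List.count_append, h2]; rfl
              · exact pvC4_app pre ')' sB' (fun p hp => h4 p (List.mem_cons_of_mem _ hp))
              · rw [hlen1]
                exact pvC8_keep pre res sk rm _ h1 (by decide) h6 h7 h8
            obtain ⟨A', r', s', b', SB', R', eA, eB, inv⟩ := ih (pre ++ [')']) _ _ _ _ _ _ hinv
            refine ⟨A', r', s', b', SB', R', ?_, ?_, ?_⟩
            · rw [pvA_loop.eq_def]
              simp only [if_neg (show ¬(')' = '(') by decide), reduceIte, hT]
              exact eA
            · rw [pvB_loop.eq_def]
              simp only [if_neg (show ¬(')' = '(') by decide), reduceIte, if_neg hbb]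
              rw [show pre.length + 1 = (pre ++ [')']).length from (hlen1).symm]
              exact eB
            · rw [List.append_cons]; exact inv
      · -- ordinary character (possibly '|')
        have hinv : pvInv (pre ++ [c]) sA (res ++ [String.singleton c]) sk
            (if c = '|' then bars + 1 else bars) sB rm := by
          refine ⟨by simp [h1], ?_, h3, pvC4_app pre c sB h4, pvC5_single pre res c h1 h5,
            fun k hk => by rw [hlen1]; exact Nat.lt_succ_of_lt (h6 k hk),
            fun k hk => by rw [hlen1]; exact Nat.lt_succ_of_lt (h7 k hk), ?_⟩
          · rw [List.count_append, h2]
            by_cases hcb : c = '|'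
            · subst hcb; simp
            · rw [if_neg hcb]
              have : [c].count '|' = 0 := by
                rw [List.count_eq_zero]
                intro hx
                rcases List.mem_singleton.mp hx with rfl
                exact hcb rfl
              omega
          · rw [hlen1]
            have hsne : String.singleton c ≠ "" := by
              intro hx
              have := congrArg String.toList hx
              rw [String.toList_singleton] at this
              cases this
            exact pvC8_keep pre res sk rm _ h1 hsne h6 h7 h8
        obtain ⟨A', r', s', b', SB', R', eA, eB, inv⟩ := ih (pre ++ [c]) _ _ _ _ _ _ hinv
        refine ⟨A', r', s', b', SB', R', ?_, ?_, ?_⟩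
        · rw [pvA_loop.eq_def]; simp only [if_neg hc1, if_neg hc2]; exact eA
        · rw [pvB_loop.eq_def]; simp only [if_neg hc1, if_neg hc2]
          rw [show pre.length + 1 = (pre ++ [c]).length from (hlen1).symm]
          by_cases hcb : c = '|'
          · rw [if_pos hcb]
            rw [if_pos hcb] at eB
            exact eB
          · rw [if_neg hcb]
            rw [if_neg hcb] at eB
            exact eB
        · rw [List.append_cons]; exact inv


theorem pvFold_eq (skip : PySem.Set Nat) (result : List String) (l : List Nat) (acc : List String) :
    l.foldl
      (fun acc i =>
        if PySem.Set.contains skip i then acc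
        else if result.getD i "" ≠ "" then acc ++ [result.getD i ""] else acc)
      acc =
    acc ++ (l.filter (fun i => !PySem.Set.contains skip i && result.getD i "" != "")).map
      (fun i => result.getD i "") := by
  induction l generalizing acc with
  | nil => simp
  | cons x xs ih =>
    rw [List.foldl_cons, List.filter_cons]
    by_cases h1 : PySem.Set.contains skip x = true
    · rw [if_pos h1, ih]
      have hc : (!PySem.Set.contains skip x && result.getD x "" != "") = false := by
        rw [h1]; rfl
      rw [hc]
      simp
    · rw [if_neg h1]
      rw [Bool.not_eq_true] at h1
      by_cases h2 : result.getD x "" = ""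
      · rw [if_neg (by simpa using h2), ih]
        have hc : (!PySem.Set.contains skip x && result.getD x "" != "") = false := by
          rw [h1, h2]; rfl
        rw [hc]
        simp
      · rw [if_pos h2, ih]
        have hc : (!PySem.Set.contains skip x && result.getD x "" != "") = true := by
          rw [h1]
          simpa [bne] using h2
        rw [hc]
        simp

theorem pvJoin_singletons (L : List Char) :
    PySem.Str.join "" (L.map String.singleton) = String.ofList L := by
  have h : (PySem.Str.join "" (L.map String.singleton)).toList = L := by
    rw [PySem.Str.toList_join]
    have h0 : ("" : String).toList = [] := rfl
    rw [h0, pvChars_join_nil_flatten, List.map_map]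
    have e : (String.toList ∘ String.singleton) = fun c => [c] := by
      funext c; simp
    rw [e]
    induction L with
    | nil => rfl
    | cons a M ih => simp [ih]
  conv_rhs => rw [← h]
  rw [String.ofList_toList]

theorem pvB_filter_eq (removed : PySem.Set Nat) (cs : List Char) :
    ∀ i, pvB_filter cs i removed =
      ((List.range cs.length).filter (fun k => !PySem.Set.contains removed (i + k))).map
        (fun k => cs.getD k ' ') := by
  induction cs with
  | nil => intro i; simp [pvB_filter]
  | cons c rest ih =>
    intro i
    rw [pvB_filter]
    have hr : List.range (rest.length + 1) = 0 :: (List.range rest.length).map (· + 1) := by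
      have := List.range_succ_eq_map (n := rest.length)
      simpa [Nat.succ_eq_add_one, Function.comp] using this
    simp only [List.length_cons, hr, List.filter_cons, List.filter_map]
    have etail :
        List.map (fun k => (c :: rest).getD k ' ')
          (List.map (· + 1)
            (List.filter ((fun k => !PySem.Set.contains removed (i + k)) ∘ (· + 1))
              (List.range rest.length))) =
        pvB_filter rest (i + 1) removed := by
      rw [List.map_map, ih (i + 1)]
      have efc : List.filter ((fun k => !PySem.Set.contains removed (i + k)) ∘ (· + 1))
          (List.range rest.length) =
          List.filter (fun k => !PySem.Set.contains removed ((i + 1) + k))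
            (List.range rest.length) := by
        apply List.filter_congr
        intro k _
        simp only [Function.comp_apply]
        have e : i + (k + 1) = i + 1 + k := by omega
        rw [e]
      rw [efc]
      apply List.map_congr_left
      intro k _
      simp
    by_cases h1 : PySem.Set.contains removed i = true
    · have hmem : i ∈ removed := (PySem.Set.contains_iff removed i).mp h1
      rw [if_pos h1]
      rw [if_neg (by simp [hmem])]
      exact etail.symm
    · rw [if_neg h1]
      rw [Bool.not_eq_true] at h1
      have hmem : i ∉ removed := by
        intro hm
        rw [(PySem.Set.contains_iff removed i).mpr hm] at h1
        simp at h1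
      rw [if_pos (by simp [hmem])]
      rw [List.map_cons]
      rw [etail]
      rfl

-- final pass: A's filtered join equals B's filtered characters
theorem pvFinal_eq (cs : List Char) (result : List String) (skip removed : PySem.Set Nat)
    (hlen : result.length = cs.length)
    (hres : ∀ k, k < cs.length →
      result.getD k "" = String.singleton (cs.getD k ' ') ∨
        (result.getD k "" = "" ∧ cs.getD k ' ' = ')'))
    (hrm : ∀ k, k < cs.length →
      (removed.contains k = true ↔ (skip.contains k = true ∨ result.getD k "" = ""))) :
    PySem.Str.join ""
      ((List.range result.length).foldl
        (fun acc i =>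
          if PySem.Set.contains skip i then acc
          else if result.getD i "" ≠ "" then acc ++ [result.getD i ""] else acc)
        []) =
    String.ofList (pvB_filter cs 0 removed) := by
  rw [pvFold_eq, List.nil_append, hlen]
  have hfil :
      (List.range cs.length).filter
        (fun i => !PySem.Set.contains skip i && result.getD i "" != "") =
      (List.range cs.length).filter (fun i => !PySem.Set.contains removed i) := by
    apply List.filter_congr
    intro k hk
    rw [List.mem_range] at hk
    have h := hrm k hk
    by_cases h2 : PySem.Set.contains removed k = true
    · rw [h2]
      rcases h.mp h2 with h3 | h3
      · rw [h3]; rfl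
      · rw [h3]; simp
    · rw [Bool.not_eq_true] at h2
      rw [h2]
      have h3 : ¬(PySem.Set.contains skip k = true ∨ result.getD k "" = "") := by
        intro h4
        rw [h.mpr h4] at h2
        simp at h2
      have h4 : PySem.Set.contains skip k = false :=
        Bool.eq_false_iff.mpr (fun hx => h3 (Or.inl hx))
      have h5 : result.getD k "" ≠ "" := fun hx => h3 (Or.inr hx)
      rw [h4]
      simpa [bne] using h5
  rw [hfil]
  have hmap :
      ((List.range cs.length).filter (fun i => !PySem.Set.contains removed i)).map
        (fun i => result.getD i "") =
      (((List.range cs.length).filter (fun i => !PySem.Set.contains removed i)).map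
        (fun i => cs.getD i ' ')).map String.singleton := by
    rw [List.map_map]
    apply List.map_congr_left
    intro k hk
    rw [List.mem_filter, List.mem_range] at hk
    obtain ⟨hk1, hk2⟩ := hk
    have hne : result.getD k "" ≠ "" := by
      intro h0
      have := (hrm k hk1).mpr (Or.inr h0)
      rw [this] at hk2
      simp at hk2
    rcases hres k hk1 with h5 | ⟨h5, _⟩
    · rw [h5]; rfl
    · exact absurd h5 hne
  rw [hmap, pvJoin_singletons, pvB_filter_eq removed cs 0]
  apply congrArg
  apply congrArg
  apply List.filter_congr
  intro k _
  rw [Nat.zero_add]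

-- ===== VERDICT (by name: the statement is the Claim_ definition above) =====
theorem remove_extra_parentheses_spec : Claim_equal_remove_extra_parentheses := by
  intro expression _
  unfold Spec_remove_extra_parentheses
  have h0 : pvInv [] [] [] PySem.Set.empty 0 [] PySem.Set.empty := by
    refine ⟨rfl, rfl, rfl, fun p hp => absurd hp (List.not_mem_nil),
      fun k hk => absurd hk (by simp), ?_, ?_, fun k hk => absurd hk (by simp)⟩
    · intro k hk
      simp [PySem.Set.empty, PySem.Set.contains] at hk
    · intro k hk
      simp [PySem.Set.empty, PySem.Set.contains] at hk
  obtain ⟨A', res, sk, b', SB', rm, eA, eB, inv⟩ :=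
    pvLoop_inv expression.toList [] [] [] PySem.Set.empty 0 [] PySem.Set.empty h0
  rw [List.length_nil] at eB
  obtain ⟨i1, i2, i3, i4, i5, i6, i7, i8⟩ := inv
  rw [List.nil_append] at i1 i5 i6 i7 i8
  simp only [remove_extra_parentheses, remove_extra_parentheses_alt, eA, eB]
  exact pvFinal_eq expression.toList res sk rm i1 i5 i8
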